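-- pv_equiv track=rewrite | github.com/AmarVekaria/DataCleanr | backend/core/cleaner.py | _dedupe_parts
-- ===== SOURCE A (Python) =====
-- def _dedupe_parts(vals: list[str]) -> list[str]:
--     cleaned = []
--     for v in vals:
--         v = (v or "").strip()
--         if not v:
--             continue
--         if any(v.lower() == c.lower() for c in cleaned):
--             continue
--         cleaned.append(v)
--
--     if len(cleaned) <= 1:
--         return cleaned
--
--     final = []
--     for v in cleaned:
--         vlow = v.lower()
--         if any((vlow != o.lower() and vlow in o.lower()) for o in cleaned):
--             continue
--         final.append(v)
--     return final
-- ===== SOURCE B (Python) =====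
-- def _dedupe_parts(vals: list[str]) -> list[str]:
--     # phase 1: first occurrence per lowercase key, kept in a dict
--     by_low = {}
--     for v in vals:
--         s = v.strip()
--         if s:
--             by_low.setdefault(s.lower(), s)
--     cleaned = list(by_low.values())
--     # phase 2: greedy over length-descending lowercase keys; a key is maximal
--     # iff it is not a substring of an already-kept (longer) maximal key —
--     # substring containment is transitive, so checking only the maximal keys suffices
--     maximal = []
--     for low in sorted(by_low.keys(), key=len, reverse=True):
--         if not any(low in m for m in maximal):
--             maximal.append(low)
--     return [v for v in cleaned if v.lower() in maximal]
-- ===== Notes on version B (the rewrite author's own statement) =====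
-- stated objective: faster
-- what changed: Dedup is done with a dict keyed by the lowercased value (setdefault keeps the first occurrence) instead of rescanning the accumulator per element, and the substring phase is a greedy maximal-set computation: iterate the lowercase keys in length-descending order, keeping a key only if it is not contained in an already-kept maximal key (transitivity of containment makes scanning only the maximal set sufficient), then filter the deduped values by membership of their lowercase in that maximal set.
import Mathlib
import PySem

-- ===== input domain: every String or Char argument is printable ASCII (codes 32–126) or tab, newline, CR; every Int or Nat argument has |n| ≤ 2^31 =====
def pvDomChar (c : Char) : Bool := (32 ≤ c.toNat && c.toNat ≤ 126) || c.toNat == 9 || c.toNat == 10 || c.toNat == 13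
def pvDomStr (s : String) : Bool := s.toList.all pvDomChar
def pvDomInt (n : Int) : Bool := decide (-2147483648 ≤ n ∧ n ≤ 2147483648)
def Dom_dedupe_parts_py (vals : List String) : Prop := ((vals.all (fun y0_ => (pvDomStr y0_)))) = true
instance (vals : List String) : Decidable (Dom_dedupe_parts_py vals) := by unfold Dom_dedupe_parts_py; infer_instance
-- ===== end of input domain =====

-- B dedups with a dict keyed by the lowercased value and replaces A's all-pairs substring scan by a
-- greedy maximal-set computation over length-descending lowercase keys (objective: faster, as measured).

-- ===== PORT A =====
-- the loop body of A's first (dedup) loop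
def dedupeStepA (cleaned : List String) (v0 : String) : List String :=
  let v := PySem.Str.strip (if v0 = "" then "" else v0)
  if v = "" then cleaned
  else if cleaned.any (fun c => PySem.Str.lower v == PySem.Str.lower c) then cleaned
  else cleaned ++ [v]

def dedupe_parts_py (vals : List String) : List String :=
  let cleaned := vals.foldl dedupeStepA []
  if cleaned.length ≤ 1 then cleaned
  else
    cleaned.foldl (fun final v =>
      let vlow := PySem.Str.lower v
      if cleaned.any (fun o => (vlow != PySem.Str.lower o) && PySem.Str.isIn vlow (PySem.Str.lower o)) then final
      else final ++ [v]) []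

-- ===== PORT B =====
-- B's dedup loop body: by_low.setdefault(s.lower(), s) for non-empty stripped s
def dedupeStepB (d : PySem.Dict String String) (v : String) : PySem.Dict String String :=
  let s := PySem.Str.strip v
  if s != "" then PySem.Dict.setdefault d (PySem.Str.lower s) s else d

-- B's greedy loop body over length-descending lowercase keys
def greedyStep (acc : List String) (low : String) : List String :=
  if acc.any (fun m => PySem.Str.isIn low m) then acc else acc ++ [low]

def dedupe_parts_py_alt (vals : List String) : List String :=
  let byLow := vals.foldl dedupeStepB PySem.Dict.empty
  let cleaned := PySem.Dict.values byLow
  let maximal := (PySem.List.sorted (PySem.Dict.keys byLow) (fun s => PySem.Str.len s) true).foldl greedyStep []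
  cleaned.filter (fun v => maximal.contains (PySem.Str.lower v))

-- ===== PRECONDITION & SPEC =====
def Spec_dedupe_parts_py (vals : List String) (out : List String) : Prop := out = dedupe_parts_py_alt vals
instance (vals : List String) (out : List String) : Decidable (Spec_dedupe_parts_py vals out) := by unfold Spec_dedupe_parts_py; infer_instance

-- ===== CLAIM (what is proved, stated in full; the proofs are below) =====
def Claim_equal_dedupe_parts_py : Prop := ∀ (vals : List String), Dom_dedupe_parts_py vals → Spec_dedupe_parts_py vals (dedupe_parts_py vals)

-- ===== LEMMAS AND PROOFS =====

-- x is dominated: it is a proper substring of another string in the pool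
def Dominated (lows : List String) (x : String) : Prop :=
  ∃ y ∈ lows, y ≠ x ∧ x.toList <:+: y.toList

-- A's first-loop membership test equals the dict-contains test of B
lemma contains_of_items (d : PySem.Dict String String) (acc : List String) (x : String)
    (h : d.items = acc.map (fun s => (PySem.Str.lower s, s))) :
    PySem.Dict.contains d x = acc.any (fun c => x == PySem.Str.lower c) := by
  rw [PySem.Dict.contains_eq_decide_mem_keys]
  have hk : d.keys = acc.map PySem.Str.lower := by
    simp only [PySem.Dict.keys, h, List.map_map]; rfl
  rw [hk, Bool.eq_iff_iff]
  simp only [decide_eq_true_eq, List.any_eq_true, List.mem_map, beq_iff_eq]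
  constructor
  · rintro ⟨c, hc, rfl⟩; exact ⟨c, hc, rfl⟩
  · rintro ⟨c, hc, rfl⟩; exact ⟨c, hc, rfl⟩

-- phase-1 invariant: B's dict holds exactly A's accumulator, keyed by lowercase
lemma phase1 : ∀ (vals acc : List String) (d : PySem.Dict String String),
    d.items = acc.map (fun s => (PySem.Str.lower s, s)) →
    (vals.foldl dedupeStepB d).items
      = (vals.foldl dedupeStepA acc).map (fun s => (PySem.Str.lower s, s)) := by
  intro vals
  induction vals with
  | nil => intro acc d h; simpa using h
  | cons v vs ih =>
    intro acc d h
    simp only [List.foldl_cons]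
    apply ih
    have hv : PySem.Str.strip (if v = "" then "" else v) = PySem.Str.strip v := by
      split <;> simp_all
    simp only [dedupeStepA, dedupeStepB, hv]
    set s := PySem.Str.strip v with hs
    by_cases hse : s = ""
    · simp [hse, h]
    · have hc := contains_of_items d acc (PySem.Str.lower s) h
      by_cases hany : acc.any (fun c => PySem.Str.lower s == PySem.Str.lower c)
      · have hcon : d.contains (PySem.Str.lower s) = true := by rw [hc]; exact hany
        rw [if_pos (by simp [hse]), PySem.Dict.setdefault_of_contains d s hcon]
        rw [if_neg hse, if_pos hany]; exact h
      · have hany' : (acc.any fun c => PySem.Str.lower s == PySem.Str.lower c) = false := by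
          simpa using hany
        have hcon : d.contains (PySem.Str.lower s) = false := by rw [hc, hany']
        rw [if_pos (by simp [hse]), PySem.Dict.setdefault_of_not_contains d s hcon]
        rw [if_neg hse, if_neg (by simp [hany'])]
        rw [PySem.Dict.items_insert_of_not_contains d s hcon, h]
        simp

-- A's accumulator has pairwise distinct lowercases
lemma nodup_lows : ∀ (vals acc : List String),
    (acc.map PySem.Str.lower).Nodup →
    ((vals.foldl dedupeStepA acc).map PySem.Str.lower).Nodup := by
  intro vals
  induction vals with
  | nil => intro acc h; simpa using h
  | cons v vs ih =>
    intro acc h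
    simp only [List.foldl_cons]
    apply ih
    unfold dedupeStepA
    set w := PySem.Str.strip (if v = "" then "" else v) with hw
    by_cases hwe : w = ""
    · simpa [hwe] using h
    · by_cases hany : acc.any (fun c => PySem.Str.lower w == PySem.Str.lower c)
      · simpa [hwe, hany] using h
      · have hnm : PySem.Str.lower w ∉ acc.map PySem.Str.lower := by
          simp only [List.any_eq_true, not_exists, not_and] at hany
          simp only [List.mem_map, not_exists, not_and]
          intro c hc heq
          exact absurd (beq_iff_eq.mpr heq.symm) (by simpa using hany c hc)
        rw [if_neg hwe, if_neg (by simpa using hany)]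
        simp only [List.map_append, List.map_cons, List.map_nil]
        rw [List.nodup_append]
        exact ⟨h, by simp, by
          intro a ha b hb
          simp only [List.mem_singleton] at hb
          subst hb
          exact fun he => hnm (he ▸ ha)⟩

-- greedy invariant: after processing a prefix of the length-descending order,
-- acc holds exactly the non-dominated processed elements, and every processed
-- element is an infix of some element of acc
lemma greedy_inv (lows : List String) (hN : lows.Nodup) :
    ∀ (rest done acc : List String),
      PySem.List.sorted lows (fun s => PySem.Str.len s) true = done ++ rest →
      (∀ z, z ∈ acc ↔ z ∈ done ∧ ¬ Dominated lows z) →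
      (∀ y ∈ done, ∃ m ∈ acc, y.toList <:+: m.toList) →
      ∀ z, z ∈ rest.foldl greedyStep acc ↔ z ∈ done ++ rest ∧ ¬ Dominated lows z := by
  intro rest
  induction rest with
  | nil => intro done acc hs hA hB z; simpa using hA z
  | cons x xs ih =>
    intro done acc hs hA hB z
    have hperm : (PySem.List.sorted lows (fun s => PySem.Str.len s) true).Perm lows :=
      PySem.List.sorted_perm lows _ true
    have hndS : (done ++ x :: xs).Nodup := hs ▸ (hperm.nodup_iff.mpr hN)
    have hxdone : x ∉ done := by
      rcases List.nodup_append.mp hndS with ⟨-, -, hdisj⟩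
      intro hx
      exact hdisj x hx x (by simp) rfl
    have hpw : (done ++ x :: xs).Pairwise
        (fun a b => PySem.Str.len b ≤ PySem.Str.len a) := by
      rw [← hs]
      exact PySem.List.sorted_pairwise_rev lows _
    have hmemlows : ∀ y, y ∈ done ++ x :: xs ↔ y ∈ lows := by
      intro y
      rw [← hs, PySem.List.mem_sorted]
    have hlong : ∀ y ∈ lows, y ≠ x → x.toList <:+: y.toList → y ∈ done := by
      intro y hy hyne hinf
      have hyS : y ∈ done ++ x :: xs := (hmemlows y).mpr hy
      rcases List.mem_append.mp hyS with h1 | h2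
      · exact h1
      · rcases List.mem_cons.mp h2 with rfl | h3
        · exact absurd rfl hyne
        · exfalso
          have hle : PySem.Str.len y ≤ PySem.Str.len x := by
            rcases List.pairwise_append.mp hpw with ⟨-, hcons, -⟩
            exact (List.pairwise_cons.mp hcons).1 y h3
          have hlen : x.toList.length = y.toList.length := by
            have hge : x.toList.length ≤ y.toList.length := hinf.length_le
            simp only [PySem.Str.len_eq] at hle
            omega
          exact hyne (String.toList_inj.mp (hinf.eq_of_length hlen)).symm
    have hs' : PySem.List.sorted lows (fun s => PySem.Str.len s) true = (done ++ [x]) ++ xs := by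
      rw [hs, List.append_cons]
    simp only [List.foldl_cons]
    by_cases ht : acc.any (fun m => PySem.Str.isIn x m) = true
    · have hstep : greedyStep acc x = acc := by unfold greedyStep; rw [ht]; simp
      obtain ⟨m, hm, hxm⟩ := List.any_eq_true.mp ht
      have hmdone : m ∈ done := ((hA m).mp hm).1
      have hmlows : m ∈ lows := (hmemlows m).mp (List.mem_append.mpr (Or.inl hmdone))
      have hmne : m ≠ x := fun he => hxdone (he ▸ hmdone)
      have hdom : Dominated lows x :=
        ⟨m, hmlows, hmne, (PySem.Str.isIn_iff_infix _ _).mp hxm⟩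
      have hA' : ∀ w, w ∈ acc ↔ w ∈ done ++ [x] ∧ ¬ Dominated lows w := by
        intro w
        rw [hA w]
        constructor
        · rintro ⟨h1, h2⟩; exact ⟨List.mem_append.mpr (Or.inl h1), h2⟩
        · rintro ⟨h1, h2⟩
          rcases List.mem_append.mp h1 with h1 | h1
          · exact ⟨h1, h2⟩
          · simp only [List.mem_singleton] at h1
            subst h1
            exact absurd hdom h2
      have hB' : ∀ y ∈ done ++ [x], ∃ m' ∈ acc, y.toList <:+: m'.toList := by
        intro y hy
        rcases List.mem_append.mp hy with h1 | h1
        · exact hB y h1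
        · simp only [List.mem_singleton] at h1
          subst h1
          exact ⟨m, hm, (PySem.Str.isIn_iff_infix _ _).mp hxm⟩
      rw [hstep, ih (done ++ [x]) acc hs' hA' hB' z, ← List.append_cons]
    · have htf : (acc.any fun m => PySem.Str.isIn x m) = false := by simpa using ht
      have hstep : greedyStep acc x = acc ++ [x] := by unfold greedyStep; rw [htf]; simp
      have hndx : ¬ Dominated lows x := by
        rintro ⟨y, hy, hyne, hinf⟩
        have hyd : y ∈ done := hlong y hy hyne hinf
        obtain ⟨m, hm, hym⟩ := hB y hyd
        have hin : PySem.Str.isIn x m = true :=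
          (PySem.Str.isIn_iff_infix _ _).mpr (hinf.trans hym)
        have : (acc.any fun m => PySem.Str.isIn x m) = true :=
          List.any_eq_true.mpr ⟨m, hm, hin⟩
        rw [htf] at this
        exact Bool.false_ne_true this
      have hA' : ∀ w, w ∈ acc ++ [x] ↔ w ∈ done ++ [x] ∧ ¬ Dominated lows w := by
        intro w
        rw [List.mem_append, List.mem_append, hA w]
        constructor
        · rintro (⟨h1, h2⟩ | h1)
          · exact ⟨Or.inl h1, h2⟩
          · simp only [List.mem_singleton] at h1
            subst h1
            exact ⟨Or.inr (by simp), hndx⟩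
        · rintro ⟨h1 | h1, h2⟩
          · exact Or.inl ⟨h1, h2⟩
          · exact Or.inr h1
      have hB' : ∀ y ∈ done ++ [x], ∃ m' ∈ acc ++ [x], y.toList <:+: m'.toList := by
        intro y hy
        rcases List.mem_append.mp hy with h1 | h1
        · obtain ⟨m, hm, hym⟩ := hB y h1
          exact ⟨m, List.mem_append.mpr (Or.inl hm), hym⟩
        · simp only [List.mem_singleton] at h1
          subst h1
          exact ⟨y, List.mem_append.mpr (Or.inr (by simp)), List.infix_refl _⟩
      rw [hstep, ih (done ++ [x]) (acc ++ [x]) hs' hA' hB' z, ← List.append_cons]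

-- the greedy result holds exactly the non-dominated pool elements
lemma mem_maximal (lows : List String) (hN : lows.Nodup) (z : String) :
    z ∈ (PySem.List.sorted lows (fun s => PySem.Str.len s) true).foldl greedyStep []
      ↔ z ∈ lows ∧ ¬ Dominated lows z := by
  have h := greedy_inv lows hN (PySem.List.sorted lows (fun s => PySem.Str.len s) true)
    [] [] (by simp) (by simp) (by simp) z
  simpa [PySem.List.mem_sorted] using h

-- pointwise: B's keep test equals the negation of A's drop test
lemma keep_test (cleaned : List String) (hN : (cleaned.map PySem.Str.lower).Nodup)
    (v : String) (hv : v ∈ cleaned) :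
    (((PySem.List.sorted (cleaned.map PySem.Str.lower) (fun s => PySem.Str.len s) true).foldl
        greedyStep []).contains (PySem.Str.lower v))
    = !(cleaned.any (fun o => (PySem.Str.lower v != PySem.Str.lower o)
          && PySem.Str.isIn (PySem.Str.lower v) (PySem.Str.lower o))) := by
  have hmem : PySem.Str.lower v ∈ cleaned.map PySem.Str.lower := List.mem_map_of_mem hv
  have Hd : Dominated (cleaned.map PySem.Str.lower) (PySem.Str.lower v)
      ↔ (cleaned.any (fun o => (PySem.Str.lower v != PySem.Str.lower o)
            && PySem.Str.isIn (PySem.Str.lower v) (PySem.Str.lower o))) = true := by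
    constructor
    · rintro ⟨y, hy, hyne, hinf⟩
      obtain ⟨o, ho, rfl⟩ := List.mem_map.mp hy
      refine List.any_eq_true.mpr ⟨o, ho, ?_⟩
      simp only [Bool.and_eq_true, bne_iff_ne]
      exact ⟨fun he => hyne he.symm, (PySem.Str.isIn_iff_infix _ _).mpr hinf⟩
    · intro h
      obtain ⟨o, ho, hb⟩ := List.any_eq_true.mp h
      simp only [Bool.and_eq_true, bne_iff_ne] at hb
      exact ⟨PySem.Str.lower o, List.mem_map_of_mem ho, fun he => hb.1 he.symm,
        (PySem.Str.isIn_iff_infix _ _).mp hb.2⟩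
  rw [Bool.eq_iff_iff, List.contains_iff_mem, mem_maximal _ hN, Hd]
  cases hany : cleaned.any (fun o => (PySem.Str.lower v != PySem.Str.lower o)
      && PySem.Str.isIn (PySem.Str.lower v) (PySem.Str.lower o)) <;> simp [hmem]

-- a list of length at most one has at most one member
lemma eq_of_mem_of_length_le_one {α : Type} (l : List α) (h : l.length ≤ 1)
    {a b : α} (ha : a ∈ l) (hb : b ∈ l) : a = b := by
  rcases l with _ | ⟨x, t⟩
  · cases ha
  · rcases t with _ | ⟨y, t2⟩
    · rw [List.mem_singleton.mp ha, List.mem_singleton.mp hb]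
    · simp at h

theorem dedupe_parts_py_spec_aux (vals : List String) :
    dedupe_parts_py vals = dedupe_parts_py_alt vals := by
  have hitems : (vals.foldl dedupeStepB PySem.Dict.empty).items
      = (vals.foldl dedupeStepA []).map (fun s => (PySem.Str.lower s, s)) :=
    phase1 vals [] PySem.Dict.empty (by rfl)
  have hN : ((vals.foldl dedupeStepA []).map PySem.Str.lower).Nodup :=
    nodup_lows vals [] (by simp)
  set cleaned := vals.foldl dedupeStepA [] with hcl
  have hvalues : PySem.Dict.values (vals.foldl dedupeStepB PySem.Dict.empty) = cleaned := by
    unfold PySem.Dict.values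
    rw [hitems, List.map_map]
    exact List.map_id _
  have hkeys : PySem.Dict.keys (vals.foldl dedupeStepB PySem.Dict.empty)
      = cleaned.map PySem.Str.lower := by
    simp only [PySem.Dict.keys, hitems, List.map_map]
    rfl
  unfold dedupe_parts_py dedupe_parts_py_alt
  simp only [← hcl, hvalues, hkeys]
  have hBfilter :
      cleaned.filter (fun v =>
        ((PySem.List.sorted (cleaned.map PySem.Str.lower) (fun s => PySem.Str.len s) true).foldl
          greedyStep []).contains (PySem.Str.lower v))
      = cleaned.filter (fun v =>
          !(cleaned.any (fun o => (PySem.Str.lower v != PySem.Str.lower o)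
              && PySem.Str.isIn (PySem.Str.lower v) (PySem.Str.lower o)))) :=
    List.filter_congr (fun v hv => keep_test cleaned hN v hv)
  rw [hBfilter]
  have hAfold :
      (cleaned.foldl (fun final v =>
        if cleaned.any (fun o => (PySem.Str.lower v != PySem.Str.lower o)
            && PySem.Str.isIn (PySem.Str.lower v) (PySem.Str.lower o)) then final
        else final ++ [v]) [])
      = cleaned.filter (fun v =>
          !(cleaned.any (fun o => (PySem.Str.lower v != PySem.Str.lower o)
              && PySem.Str.isIn (PySem.Str.lower v) (PySem.Str.lower o)))) := by
    have hfun : (fun (final : List String) v =>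
        if cleaned.any (fun o => (PySem.Str.lower v != PySem.Str.lower o)
            && PySem.Str.isIn (PySem.Str.lower v) (PySem.Str.lower o)) then final
        else final ++ [v])
        = (fun final v =>
            if (!(cleaned.any (fun o => (PySem.Str.lower v != PySem.Str.lower o)
                && PySem.Str.isIn (PySem.Str.lower v) (PySem.Str.lower o)))) = true
            then final ++ [id v] else final) := by
      funext a b
      cases h : cleaned.any (fun o => (PySem.Str.lower b != PySem.Str.lower o)
          && PySem.Str.isIn (PySem.Str.lower b) (PySem.Str.lower o))
      · simp
      · simp
    rw [hfun, PySem.List.foldl_append_if _ id cleaned []]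
    simp
  split_ifs with hlen
  · -- short lists: the substring filter keeps everything
    symm
    apply List.filter_eq_self.mpr
    intro v hv
    simp only [Bool.not_eq_true', List.any_eq_false]
    intro o ho
    have he : o = v := eq_of_mem_of_length_le_one cleaned hlen ho hv
    subst he
    simp
  · rw [hAfold]

-- ===== VERDICT (by name: the statement is the Claim_ definition above) =====
theorem dedupe_parts_py_spec : Claim_equal_dedupe_parts_py := by
  intro vals _
  exact dedupe_parts_py_spec_aux vals
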